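-- pv_equiv track=rewrite | github.com/pypi-data/pypi-mirror-400 | packages/abstractcode/abstractcode-0.3.0.tar.gz/abstractcode-0.3.0/tests/test_fullscreen_ui_spinner_shimmer.py | _highlighted_spinner_indices
-- ===== SOURCE A (Python) =====
-- def _highlighted_spinner_indices(formatted) -> set[int]:
--     """Return indices (within spinner text) that are currently highlighted.
--
--     The status bar formats spinner text as a sequence of fragments:
--     - ("class:spinner", " <glyph> ")
--     - ("class:spinner-text", "...")
--     - ("class:spinner-text-highlight", "...")
--     - ("class:status-text", "  │  ...")
--     """
--     idx = 0
--     highlighted: set[int] = set()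
--
--     for frag in formatted:
--         if not isinstance(frag, tuple) or len(frag) < 2:
--             continue
--         style, text = frag[0], frag[1]
--         if style not in ("class:spinner-text", "class:spinner-text-highlight"):
--             continue
--         if not isinstance(text, str):
--             continue
--         if style == "class:spinner-text-highlight":
--             highlighted.update(range(idx, idx + len(text)))
--         idx += len(text)
--
--     return highlighted
-- ===== SOURCE B (Python) =====
-- def _highlighted_spinner_indices(formatted) -> set[int]:
--     # Build a per-character highlight mask of the concatenated spinner text,
--     # then read off the positions of the True cells.
--     mask: list[bool] = []
--     for frag in formatted:
--         if isinstance(frag, tuple) and len(frag) >= 2: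
--             style, text = frag[0], frag[1]
--             if isinstance(text, str) and style in ("class:spinner-text", "class:spinner-text-highlight"):
--                 mask.extend([style == "class:spinner-text-highlight"] * len(text))
--     return {i for i, hl in enumerate(mask) if hl}
-- ===== Notes on version B (the rewrite author's own statement) =====
-- stated objective: alternative
-- what changed: B replaces A's offset bookkeeping and range-set unions with a per-character boolean highlight mask of the concatenated spinner text, reading the result off as the enumerate-positions of True cells.
import Mathlib
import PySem

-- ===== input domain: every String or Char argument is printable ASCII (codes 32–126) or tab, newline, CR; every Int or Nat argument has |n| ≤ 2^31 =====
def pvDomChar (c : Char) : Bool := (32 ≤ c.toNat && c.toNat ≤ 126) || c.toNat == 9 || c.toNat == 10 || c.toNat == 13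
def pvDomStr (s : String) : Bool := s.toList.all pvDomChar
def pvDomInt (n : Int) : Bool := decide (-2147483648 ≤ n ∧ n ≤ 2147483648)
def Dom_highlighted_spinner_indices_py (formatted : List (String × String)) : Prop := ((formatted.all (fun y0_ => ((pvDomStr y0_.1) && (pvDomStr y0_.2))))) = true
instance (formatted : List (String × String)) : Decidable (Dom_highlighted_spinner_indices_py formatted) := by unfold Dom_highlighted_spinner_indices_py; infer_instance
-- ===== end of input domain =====

-- B replaces A's offset bookkeeping and range-set unions with a per-character boolean
-- highlight mask of the concatenated spinner text, returning the enumerate-positions of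
-- the True cells (objective: alternative algorithm, same cost).
-- ===== PORT A =====
-- A's loop body: state is (idx, highlighted). Fragments are (String × String) pairs, so the
-- isinstance/len guards of the Python are always satisfied under the type convention.
def aStep (st : Int × PySem.Set Int) (frag : String × String) : Int × PySem.Set Int :=
  if frag.1 = "class:spinner-text" ∨ frag.1 = "class:spinner-text-highlight" then
    let hl := if frag.1 = "class:spinner-text-highlight" then
        PySem.Set.update st.2 (PySem.List.pyRange st.1 (st.1 + PySem.Str.len frag.2) 1)
      else st.2
    (st.1 + PySem.Str.len frag.2, hl)
  else st

def highlighted_spinner_indices_py (formatted : List (String × String)) : List Int :=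
  (formatted.foldl aStep (0, PySem.Set.empty)).2

-- ===== PORT B =====
-- The mask a surviving fragment contributes: len(text) copies of its highlight flag
-- ([flag] * len(text)); non-surviving fragments contribute nothing.
def fragMask (frag : String × String) : List Bool :=
  if frag.1 = "class:spinner-text" ∨ frag.1 = "class:spinner-text-highlight" then
    List.replicate (PySem.Str.len frag.2).toNat (decide (frag.1 = "class:spinner-text-highlight"))
  else []

-- mask loop (extend = ++), then the set comprehension {i for i, hl in enumerate(mask) if hl}.
def highlighted_spinner_indices_py_alt (formatted : List (String × String)) : List Int :=
  let mask := formatted.foldl (fun m frag => m ++ fragMask frag) []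
  PySem.Set.ofList (((PySem.List.enumerate mask 0).filter (fun p => p.2)).map (fun p => p.1))

-- ===== PRECONDITION & SPEC =====
def Spec_highlighted_spinner_indices_py (formatted : List (String × String)) (out : List Int) : Prop := out = highlighted_spinner_indices_py_alt formatted
instance (formatted : List (String × String)) (out : List Int) : Decidable (Spec_highlighted_spinner_indices_py formatted out) := by unfold Spec_highlighted_spinner_indices_py; infer_instance

-- ===== CLAIM (what is proved, stated in full; the proofs are below) =====
def Claim_equal_highlighted_spinner_indices_py : Prop := ∀ (formatted : List (String × String)), Dom_highlighted_spinner_indices_py formatted → Spec_highlighted_spinner_indices_py formatted (highlighted_spinner_indices_py formatted)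

-- ===== LEMMAS AND PROOFS =====

-- Indices (from offset i) of the True cells of a mask: the common characterisation.
def trueIdx : List Bool → Int → List Int
  | [], _ => []
  | b :: bs, i => (if b then [i] else []) ++ trueIdx bs (i + 1)

theorem trueIdx_append (m₁ m₂ : List Bool) (i : Int) :
    trueIdx (m₁ ++ m₂) i = trueIdx m₁ i ++ trueIdx m₂ (i + m₁.length) := by
  induction m₁ generalizing i with
  | nil => simp [trueIdx]
  | cons b bs ih =>
    simp only [List.cons_append, trueIdx, ih, List.length_cons, List.append_assoc]
    congr 2
    push_cast; ring_nf

theorem trueIdx_replicate_true (n : Nat) (i : Int) :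
    trueIdx (List.replicate n true) i = PySem.List.pyRange i (i + n) 1 := by
  induction n generalizing i with
  | zero => simp [trueIdx, PySem.List.pyRange_one_eq_nil]
  | succ n ih =>
    rw [List.replicate_succ]
    have h1 : i + ((n + 1 : Nat) : Int) = (i + 1) + (n : Int) := by push_cast; ring
    rw [h1, PySem.List.pyRange_one_cons (by omega)]
    simp [trueIdx, ih]

theorem trueIdx_replicate_false (n : Nat) (i : Int) :
    trueIdx (List.replicate n false) i = [] := by
  induction n generalizing i with
  | zero => rfl
  | succ n ih => rw [List.replicate_succ]; simpa [trueIdx] using ih (i + 1)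

-- B's enumerate/filter/map pipeline computes trueIdx.
theorem enum_filter_map (m : List Bool) (s : Int) :
    ((PySem.List.enumerate m s).filter (fun p => p.2)).map (fun p => p.1) = trueIdx m s := by
  induction m generalizing s with
  | nil => rfl
  | cons b bs ih =>
    rw [PySem.List.enumerate_cons]
    cases b <;> simp [trueIdx, ih]

-- Set.update distributes over list append.
theorem set_update_append (s : PySem.Set Int) (l₁ l₂ : List Int) :
    PySem.Set.update s (l₁ ++ l₂) = PySem.Set.update (PySem.Set.update s l₁) l₂ := by
  simp [PySem.Set.update, List.foldl_append]

-- Main invariant: A's fold from (i, s) tracks the mask's length and the trueIdx update.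
theorem main_invariant (fs : List (String × String)) (i : Int) (s : PySem.Set Int) :
    fs.foldl aStep (i, s)
      = (i + ((fs.flatMap fragMask).length : Int),
         PySem.Set.update s (trueIdx (fs.flatMap fragMask) i)) := by
  induction fs generalizing i s with
  | nil => simp [trueIdx, PySem.Set.update]
  | cons f fs ih =>
    rw [List.foldl_cons, List.flatMap_cons, trueIdx_append, set_update_append]
    by_cases h : f.1 = "class:spinner-text" ∨ f.1 = "class:spinner-text-highlight"
    · have hlen : (0:Int) ≤ PySem.Str.len f.2 := by
        simp [PySem.Str.len_eq]
      have hcast : (((PySem.Str.len f.2).toNat : Int)) = PySem.Str.len f.2 :=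
        Int.toNat_of_nonneg hlen
      by_cases hh : f.1 = "class:spinner-text-highlight"
      · have ha : aStep (i, s) f
            = (i + PySem.Str.len f.2,
               PySem.Set.update s (PySem.List.pyRange i (i + PySem.Str.len f.2) 1)) := by
          simp [aStep, hh]
        have hf : fragMask f = List.replicate (PySem.Str.len f.2).toNat true := by
          simp [fragMask, hh]
        rw [ha, ih, hf, trueIdx_replicate_true, hcast]
        simp
        ring
      · have hst : f.1 = "class:spinner-text" := h.resolve_right hh
        have ha : aStep (i, s) f = (i + PySem.Str.len f.2, s) := by
          simp [aStep, hst]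
        have hf : fragMask f = List.replicate (PySem.Str.len f.2).toNat false := by
          simp [fragMask, hst]
        rw [ha, ih, hf, trueIdx_replicate_false]
        simp only [PySem.Set.update, List.foldl_nil, List.length_replicate]
        rw [hcast]
        simp
        ring
    · have ha : aStep (i, s) f = (i, s) := by simp [aStep, h]
      have hf : fragMask f = [] := by simp [fragMask, h]
      rw [ha, ih, hf]
      simp [trueIdx, PySem.Set.update]

-- ===== VERDICT (by name: the statement is the Claim_ definition above) =====
theorem highlighted_spinner_indices_py_spec : Claim_equal_highlighted_spinner_indices_py := by
  intro formatted _
  unfold Spec_highlighted_spinner_indices_py highlighted_spinner_indices_py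
    highlighted_spinner_indices_py_alt
  rw [PySem.List.foldl_append_eq_flatMap fragMask formatted []]
  simp only [List.nil_append, enum_filter_map, main_invariant, PySem.Set.ofList_eq_foldl]
  rfl
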